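-- pv_equiv track=rewrite | github.com/jonathonreilly/toy-physics | scripts/frontier_s3_boundary_link_theorem.py | vertex_link_BR
-- ===== SOURCE A (Python) =====
-- def vertex_link_BR(v: tuple, sites: set) -> tuple[list, list, list]:
--     """
--     Compute link(v, B_R) as a subcomplex of the octahedral link(v, Z^3).
--     Returns (link_verts_as_dirs, link_edges_as_index_pairs,
--              link_tris_as_index_triples).
--     """
--     x, y, z = v
--     axis_dirs = [(1, 0, 0), (-1, 0, 0), (0, 1, 0), (0, -1, 0),
--                  (0, 0, 1), (0, 0, -1)]
--
--     link_verts = [d for d in axis_dirs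
--                   if (x + d[0], y + d[1], z + d[2]) in sites]
--
--     link_edges = []
--     for i, d1 in enumerate(link_verts):
--         for j, d2 in enumerate(link_verts):
--             if j <= i:
--                 continue
--             if sum(d1[k] * d2[k] for k in range(3)) != 0:
--                 continue
--             corner = (x + d1[0] + d2[0], y + d1[1] + d2[1],
--                       z + d1[2] + d2[2])
--             if corner in sites:
--                 link_edges.append((i, j))
--
--     link_tris = []
--     for i, d1 in enumerate(link_verts):
--         for j, d2 in enumerate(link_verts):
--             if j <= i:
--                 continue
--             for k, d3 in enumerate(link_verts):
--                 if k <= j: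
--                     continue
--                 dot12 = sum(d1[l] * d2[l] for l in range(3))
--                 dot13 = sum(d1[l] * d3[l] for l in range(3))
--                 dot23 = sum(d2[l] * d3[l] for l in range(3))
--                 if dot12 != 0 or dot13 != 0 or dot23 != 0:
--                     continue
--                 pts = [
--                     (x + d1[0], y + d1[1], z + d1[2]),
--                     (x + d2[0], y + d2[1], z + d2[2]),
--                     (x + d3[0], y + d3[1], z + d3[2]),
--                     (x + d1[0] + d2[0], y + d1[1] + d2[1],
--                      z + d1[2] + d2[2]),
--                     (x + d1[0] + d3[0], y + d1[1] + d3[1],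
--                      z + d1[2] + d3[2]),
--                     (x + d2[0] + d3[0], y + d2[1] + d3[1],
--                      z + d2[2] + d3[2]),
--                     (x + d1[0] + d2[0] + d3[0],
--                      y + d1[1] + d2[1] + d3[1],
--                      z + d1[2] + d2[2] + d3[2]),
--                 ]
--                 if all(p in sites for p in pts):
--                     link_tris.append((i, j, k))
--
--     return link_verts, link_edges, link_tris
-- ===== SOURCE B (Python) =====
-- def vertex_link_BR(v: tuple, sites: set) -> tuple[list, list, list]:
--     """
--     Same link computation, restructured: edges are computed once over index
--     ranges i<j, and triangles reuse the edge list -- a triple (i,j,k) is a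
--     triangle iff its three sides are already edges and the single body-corner
--     point (the only cube point the edges do not certify) lies in sites.
--     """
--     x, y, z = v
--     axis_dirs = [(1, 0, 0), (-1, 0, 0), (0, 1, 0), (0, -1, 0),
--                  (0, 0, 1), (0, 0, -1)]
--
--     link_verts = [d for d in axis_dirs
--                   if (x + d[0], y + d[1], z + d[2]) in sites]
--     n = len(link_verts)
--
--     link_edges = []
--     for i in range(n):
--         for j in range(i + 1, n):
--             d1, d2 = link_verts[i], link_verts[j]
--             if d1[0] * d2[0] + d1[1] * d2[1] + d1[2] * d2[2] == 0 and \
--                (x + d1[0] + d2[0], y + d1[1] + d2[1],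
--                 z + d1[2] + d2[2]) in sites:
--                 link_edges.append((i, j))
--
--     link_tris = []
--     for i in range(n):
--         for j in range(i + 1, n):
--             if (i, j) not in link_edges:
--                 continue
--             for k in range(j + 1, n):
--                 if (i, k) in link_edges and (j, k) in link_edges:
--                     d1, d2, d3 = link_verts[i], link_verts[j], link_verts[k]
--                     body = (x + d1[0] + d2[0] + d3[0],
--                             y + d1[1] + d2[1] + d3[1],
--                             z + d1[2] + d2[2] + d3[2])
--                     if body in sites:
--                         link_tris.append((i, j, k))
--
--     return link_verts, link_edges, link_tris
-- ===== Notes on version B (the rewrite author's own statement) =====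
-- stated objective: alternative
-- what changed: B iterates index ranges i<j(<k) instead of enumerate-with-continue, and derives triangles from the already-computed edge list (three sides must be edges) plus the single body-corner membership test, instead of re-checking the three dot products and all seven cube points per triple.
import Mathlib
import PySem

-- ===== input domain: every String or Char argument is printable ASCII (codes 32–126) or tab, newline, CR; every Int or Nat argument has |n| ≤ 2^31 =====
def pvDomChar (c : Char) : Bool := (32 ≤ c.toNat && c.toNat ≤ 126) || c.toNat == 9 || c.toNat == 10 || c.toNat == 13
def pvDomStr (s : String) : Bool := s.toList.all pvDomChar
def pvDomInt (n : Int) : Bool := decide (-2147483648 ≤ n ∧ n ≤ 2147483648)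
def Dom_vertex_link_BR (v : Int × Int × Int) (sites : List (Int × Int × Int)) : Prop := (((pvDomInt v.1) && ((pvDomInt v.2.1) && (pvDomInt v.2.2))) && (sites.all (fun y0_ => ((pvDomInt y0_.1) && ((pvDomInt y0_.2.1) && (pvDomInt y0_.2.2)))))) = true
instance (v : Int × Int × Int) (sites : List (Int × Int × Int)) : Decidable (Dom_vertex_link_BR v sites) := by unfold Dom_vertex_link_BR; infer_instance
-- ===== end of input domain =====

-- B recomputes the same link: edges over index ranges i<j, and triangles by reusing the
-- edge list (three sides must already be edges) plus the single body-corner membership test.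
-- A's triple loop instead re-checks three dot products and all seven cube points per triple.

-- ===== PORT A =====
def vertex_link_BR (v : Int × Int × Int) (sites : List (Int × Int × Int)) : (List (Int × Int × Int)) × (List (Int × Int)) × (List (Int × Int × Int)) :=
  let x := v.1; let y := v.2.1; let z := v.2.2
  let axis_dirs : List (Int × Int × Int) :=
    [(1,0,0), (-1,0,0), (0,1,0), (0,-1,0), (0,0,1), (0,0,-1)]
  let link_verts := axis_dirs.filter (fun d => decide ((x + d.1, y + d.2.1, z + d.2.2) ∈ sites))
  let link_edges := (PySem.List.enumerate link_verts).foldl (fun acc p1 =>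
      (PySem.List.enumerate link_verts).foldl (fun acc2 p2 =>
        if p2.1 ≤ p1.1 then acc2
        else if p1.2.1 * p2.2.1 + p1.2.2.1 * p2.2.2.1 + p1.2.2.2 * p2.2.2.2 ≠ 0 then acc2
        else if (x + p1.2.1 + p2.2.1, y + p1.2.2.1 + p2.2.2.1, z + p1.2.2.2 + p2.2.2.2) ∈ sites
          then acc2 ++ [(p1.1, p2.1)] else acc2) acc) ([] : List (Int × Int))
  let link_tris := (PySem.List.enumerate link_verts).foldl (fun acc p1 =>
      (PySem.List.enumerate link_verts).foldl (fun acc2 p2 =>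
        if p2.1 ≤ p1.1 then acc2
        else (PySem.List.enumerate link_verts).foldl (fun acc3 p3 =>
          if p3.1 ≤ p2.1 then acc3
          else
            let dot12 := p1.2.1 * p2.2.1 + p1.2.2.1 * p2.2.2.1 + p1.2.2.2 * p2.2.2.2
            let dot13 := p1.2.1 * p3.2.1 + p1.2.2.1 * p3.2.2.1 + p1.2.2.2 * p3.2.2.2
            let dot23 := p2.2.1 * p3.2.1 + p2.2.2.1 * p3.2.2.1 + p2.2.2.2 * p3.2.2.2
            if dot12 ≠ 0 ∨ dot13 ≠ 0 ∨ dot23 ≠ 0 then acc3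
            else
              let pts : List (Int × Int × Int) :=
                [(x + p1.2.1, y + p1.2.2.1, z + p1.2.2.2),
                 (x + p2.2.1, y + p2.2.2.1, z + p2.2.2.2),
                 (x + p3.2.1, y + p3.2.2.1, z + p3.2.2.2),
                 (x + p1.2.1 + p2.2.1, y + p1.2.2.1 + p2.2.2.1, z + p1.2.2.2 + p2.2.2.2),
                 (x + p1.2.1 + p3.2.1, y + p1.2.2.1 + p3.2.2.1, z + p1.2.2.2 + p3.2.2.2),
                 (x + p2.2.1 + p3.2.1, y + p2.2.2.1 + p3.2.2.1, z + p2.2.2.2 + p3.2.2.2),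
                 (x + p1.2.1 + p2.2.1 + p3.2.1, y + p1.2.2.1 + p2.2.2.1 + p3.2.2.1, z + p1.2.2.2 + p2.2.2.2 + p3.2.2.2)]
              if pts.all (fun p => decide (p ∈ sites)) then acc3 ++ [(p1.1, p2.1, p3.1)] else acc3) acc2) acc)
      ([] : List (Int × Int × Int))
  (link_verts, link_edges, link_tris)

-- ===== PORT B =====
def vertex_link_BR_alt (v : Int × Int × Int) (sites : List (Int × Int × Int)) : (List (Int × Int × Int)) × (List (Int × Int)) × (List (Int × Int × Int)) :=
  let x := v.1; let y := v.2.1; let z := v.2.2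
  let axis_dirs : List (Int × Int × Int) :=
    [(1,0,0), (-1,0,0), (0,1,0), (0,-1,0), (0,0,1), (0,0,-1)]
  let link_verts := axis_dirs.filter (fun d => decide ((x + d.1, y + d.2.1, z + d.2.2) ∈ sites))
  let n : Int := link_verts.length
  let link_edges := (PySem.List.pyRange 0 n 1).foldl (fun acc i =>
      (PySem.List.pyRange (i+1) n 1).foldl (fun acc2 j =>
        let d1 := PySem.List.pyGetD link_verts i (0,0,0)
        let d2 := PySem.List.pyGetD link_verts j (0,0,0)
        if d1.1 * d2.1 + d1.2.1 * d2.2.1 + d1.2.2 * d2.2.2 = 0 ∧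
           (x + d1.1 + d2.1, y + d1.2.1 + d2.2.1, z + d1.2.2 + d2.2.2) ∈ sites
        then acc2 ++ [(i, j)] else acc2) acc) ([] : List (Int × Int))
  let link_tris := (PySem.List.pyRange 0 n 1).foldl (fun acc i =>
      (PySem.List.pyRange (i+1) n 1).foldl (fun acc2 j =>
        if (i, j) ∉ link_edges then acc2
        else (PySem.List.pyRange (j+1) n 1).foldl (fun acc3 k =>
          if (i, k) ∈ link_edges ∧ (j, k) ∈ link_edges then
            let d1 := PySem.List.pyGetD link_verts i (0,0,0)
            let d2 := PySem.List.pyGetD link_verts j (0,0,0)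
            let d3 := PySem.List.pyGetD link_verts k (0,0,0)
            if (x + d1.1 + d2.1 + d3.1, y + d1.2.1 + d2.2.1 + d3.2.1, z + d1.2.2 + d2.2.2 + d3.2.2) ∈ sites
            then acc3 ++ [(i, j, k)] else acc3
          else acc3) acc2) acc) ([] : List (Int × Int × Int))
  (link_verts, link_edges, link_tris)

-- ===== PRECONDITION & SPEC =====
def Spec_vertex_link_BR (v : Int × Int × Int) (sites : List (Int × Int × Int)) (out : (List (Int × Int × Int)) × (List (Int × Int)) × (List (Int × Int × Int))) : Prop := out = vertex_link_BR_alt v sites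
instance (v : Int × Int × Int) (sites : List (Int × Int × Int)) (out : (List (Int × Int × Int)) × (List (Int × Int)) × (List (Int × Int × Int))) : Decidable (Spec_vertex_link_BR v sites out) := by unfold Spec_vertex_link_BR; infer_instance

-- ===== CLAIM (what is proved, stated in full; the proofs are below) =====
def Claim_equal_vertex_link_BR : Prop := ∀ (v : Int × Int × Int) (sites : List (Int × Int × Int)), Dom_vertex_link_BR v sites → Spec_vertex_link_BR v sites (vertex_link_BR v sites)

-- ===== LEMMAS AND PROOFS =====

-- the directions list seen through an in-range integer index
def pvG (verts : List (Int × Int × Int)) (i : Int) : Int × Int × Int :=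
  PySem.List.pyGetD verts i (0,0,0)

def pvDotg (verts : List (Int × Int × Int)) (i j : Int) : Int :=
  (pvG verts i).1 * (pvG verts j).1 + (pvG verts i).2.1 * (pvG verts j).2.1 + (pvG verts i).2.2 * (pvG verts j).2.2

def pvCorn (x y z : Int) (verts : List (Int × Int × Int)) (i j : Int) : Int × Int × Int :=
  (x + (pvG verts i).1 + (pvG verts j).1, y + (pvG verts i).2.1 + (pvG verts j).2.1, z + (pvG verts i).2.2 + (pvG verts j).2.2)

def pvBody (x y z : Int) (verts : List (Int × Int × Int)) (i j k : Int) : Int × Int × Int :=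
  (x + (pvG verts i).1 + (pvG verts j).1 + (pvG verts k).1,
   y + (pvG verts i).2.1 + (pvG verts j).2.1 + (pvG verts k).2.1,
   z + (pvG verts i).2.2 + (pvG verts j).2.2 + (pvG verts k).2.2)

def pvQ (x y z : Int) (sites : List (Int × Int × Int)) (verts : List (Int × Int × Int)) (i j : Int) : Bool :=
  (pvDotg verts i j == 0) && decide (pvCorn x y z verts i j ∈ sites)

def pvEdges (x y z : Int) (sites verts : List (Int × Int × Int)) : List (Int × Int) :=
  (PySem.List.pyRange 0 (verts.length : Int) 1).flatMap (fun i =>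
    ((PySem.List.pyRange (i+1) (verts.length : Int) 1).filter (pvQ x y z sites verts i)).map (fun j => (i, j)))

def pvTfun (n : Int) (C : Int → Int → Int → Bool) : List (Int × Int × Int) :=
  (PySem.List.pyRange 0 n 1).flatMap (fun i =>
    (PySem.List.pyRange (i+1) n 1).flatMap (fun j =>
      ((PySem.List.pyRange (j+1) n 1).filter (fun k => C i j k)).map (fun k => (i, j, k))))

def pvCA (x y z : Int) (sites verts : List (Int × Int × Int)) (i j k : Int) : Bool :=
  (pvDotg verts i j == 0) && (pvDotg verts i k == 0) && (pvDotg verts j k == 0) &&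
  decide ((x + (pvG verts i).1, y + (pvG verts i).2.1, z + (pvG verts i).2.2) ∈ sites) &&
  decide ((x + (pvG verts j).1, y + (pvG verts j).2.1, z + (pvG verts j).2.2) ∈ sites) &&
  decide ((x + (pvG verts k).1, y + (pvG verts k).2.1, z + (pvG verts k).2.2) ∈ sites) &&
  decide (pvCorn x y z verts i j ∈ sites) && decide (pvCorn x y z verts i k ∈ sites) &&
  decide (pvCorn x y z verts j k ∈ sites) && decide (pvBody x y z verts i j k ∈ sites)

def pvCB (x y z : Int) (sites verts : List (Int × Int × Int)) (i j k : Int) : Bool :=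
  decide ((i, j) ∈ pvEdges x y z sites verts) && decide ((i, k) ∈ pvEdges x y z sites verts) &&
  decide ((j, k) ∈ pvEdges x y z sites verts) && decide (pvBody x y z verts i j k ∈ sites)

lemma pv_flatMap_congr {α β : Type} {l : List α} {f g : α → List β}
    (h : ∀ x ∈ l, f x = g x) : l.flatMap f = l.flatMap g := by
  induction l with
  | nil => rfl
  | cons a t ih =>
      simp only [List.flatMap_cons]
      rw [h a (by simp), ih (fun x hx => h x (by simp [hx]))]

lemma pv_filter_range_lt (n i : Int) (p : Int → Bool) (hi : 0 ≤ i) :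
    (PySem.List.pyRange 0 n 1).filter (fun j => decide (i < j) && p j)
      = (PySem.List.pyRange (i+1) n 1).filter p := by
  by_cases hn : i + 1 ≤ n
  · rw [PySem.List.pyRange_one_append 0 (i+1) n (by omega) hn, List.filter_append]
    have h1 : (PySem.List.pyRange 0 (i+1) 1).filter (fun j => decide (i < j) && p j) = [] := by
      apply List.filter_eq_nil_iff.mpr
      intro j hj
      rw [PySem.List.mem_pyRange_one] at hj
      simp only [Bool.and_eq_true, decide_eq_true_eq, not_and]
      intro h; omega
    rw [h1, List.nil_append]
    apply List.filter_congr
    intro j hj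
    rw [PySem.List.mem_pyRange_one] at hj
    simp [show i < j by omega]
  · rw [PySem.List.pyRange_one_eq_nil (by omega : n ≤ i + 1), List.filter_nil]
    apply List.filter_eq_nil_iff.mpr
    intro j hj
    rw [PySem.List.mem_pyRange_one] at hj
    simp only [Bool.and_eq_true, decide_eq_true_eq, not_and]
    intro h; omega

lemma pv_flatMap_range_lt {β : Type} (n i : Int) (F : Int → List β) (hi : 0 ≤ i)
    (h0 : ∀ j, ¬ i < j → F j = []) :
    (PySem.List.pyRange 0 n 1).flatMap F = (PySem.List.pyRange (i+1) n 1).flatMap F := by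
  by_cases hn : i + 1 ≤ n
  · rw [PySem.List.pyRange_one_append 0 (i+1) n (by omega) hn, List.flatMap_append]
    have h1 : (PySem.List.pyRange 0 (i+1) 1).flatMap F = [] := by
      apply List.flatMap_eq_nil_iff.mpr
      intro j hj
      rw [PySem.List.mem_pyRange_one] at hj
      exact h0 j (by omega)
    rw [h1, List.nil_append]
  · rw [PySem.List.pyRange_one_eq_nil (by omega : n ≤ i + 1), List.flatMap_nil]
    apply List.flatMap_eq_nil_iff.mpr
    intro j hj
    rw [PySem.List.mem_pyRange_one] at hj
    exact h0 j (by omega)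

lemma mem_pvEdges (x y z : Int) (sites verts : List (Int × Int × Int)) (a b : Int) :
    (a, b) ∈ pvEdges x y z sites verts ↔
      0 ≤ a ∧ a < b ∧ b < (verts.length : Int) ∧ pvQ x y z sites verts a b := by
  unfold pvEdges
  simp only [List.mem_flatMap, List.mem_map, List.mem_filter, PySem.List.mem_pyRange_one,
    Prod.mk.injEq]
  constructor
  · rintro ⟨i, ⟨hi0, hin⟩, j, ⟨⟨hj1, hj2⟩, hq⟩, hia, hjb⟩
    subst hia; subst hjb
    exact ⟨hi0, by omega, hj2, hq⟩
  · rintro ⟨ha0, hab, hbn, hq⟩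
    exact ⟨a, ⟨ha0, by omega⟩, b, ⟨⟨by omega, hbn⟩, hq⟩, rfl, rfl⟩

lemma pv_edgesA (x y z : Int) (sites verts : List (Int × Int × Int)) :
    ((PySem.List.enumerate verts).foldl (fun acc p1 =>
      (PySem.List.enumerate verts).foldl (fun acc2 p2 =>
        if p2.1 ≤ p1.1 then acc2
        else if p1.2.1 * p2.2.1 + p1.2.2.1 * p2.2.2.1 + p1.2.2.2 * p2.2.2.2 ≠ 0 then acc2
        else if (x + p1.2.1 + p2.2.1, y + p1.2.2.1 + p2.2.2.1, z + p1.2.2.2 + p2.2.2.2) ∈ sites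
          then acc2 ++ [(p1.1, p2.1)] else acc2) acc) ([] : List (Int × Int)))
    = pvEdges x y z sites verts := by
  have hin : ∀ (p1 : Int × (Int × Int × Int)) (acc : List (Int × Int)),
      ((PySem.List.enumerate verts).foldl (fun acc2 p2 =>
        if p2.1 ≤ p1.1 then acc2
        else if p1.2.1 * p2.2.1 + p1.2.2.1 * p2.2.2.1 + p1.2.2.2 * p2.2.2.2 ≠ 0 then acc2
        else if (x + p1.2.1 + p2.2.1, y + p1.2.2.1 + p2.2.2.1, z + p1.2.2.2 + p2.2.2.2) ∈ sites
          then acc2 ++ [(p1.1, p2.1)] else acc2) acc)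
      = acc ++ ((PySem.List.enumerate verts).filter (fun p2 =>
          decide (¬ (p2.1 ≤ p1.1) ∧
            ¬ (p1.2.1 * p2.2.1 + p1.2.2.1 * p2.2.2.1 + p1.2.2.2 * p2.2.2.2 ≠ 0) ∧
            (x + p1.2.1 + p2.2.1, y + p1.2.2.1 + p2.2.2.1, z + p1.2.2.2 + p2.2.2.2) ∈ sites))).map
          (fun p2 => (p1.1, p2.1)) := by
    intro p1 acc
    refine (PySem.List.foldl_congr_mem _ _ _ _ (fun acc2 p2 _ => ?_)).trans
      (PySem.List.foldl_append_ite _ _ _ _)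
    split_ifs <;> tauto
  refine (PySem.List.foldl_congr_mem _ _ _ _ (fun acc p1 _ => hin p1 acc)).trans ?_
  rw [PySem.List.foldl_append_eq_flatMap, List.nil_append,
    PySem.List.enumerate_eq_map_pyRange verts (0,0,0)]
  simp only [List.flatMap_map, List.filter_map, List.map_map, PySem.List.len_eq,
    Function.comp_def]
  apply pv_flatMap_congr
  intro i hi
  rw [PySem.List.mem_pyRange_one] at hi
  rw [List.filter_congr (q := fun j => decide (i < j) && pvQ x y z sites verts i j)
    (fun j _ => by
      rw [Bool.eq_iff_iff]
      simp [pvQ, pvDotg, pvCorn, pvG, not_le])]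
  rw [pv_filter_range_lt _ _ _ hi.1]

lemma pv_edgesB (x y z : Int) (sites verts : List (Int × Int × Int)) :
    ((PySem.List.pyRange 0 (verts.length : Int) 1).foldl (fun acc i =>
      (PySem.List.pyRange (i+1) (verts.length : Int) 1).foldl (fun acc2 j =>
        if (PySem.List.pyGetD verts i (0,0,0)).1 * (PySem.List.pyGetD verts j (0,0,0)).1 +
             (PySem.List.pyGetD verts i (0,0,0)).2.1 * (PySem.List.pyGetD verts j (0,0,0)).2.1 +
             (PySem.List.pyGetD verts i (0,0,0)).2.2 * (PySem.List.pyGetD verts j (0,0,0)).2.2 = 0 ∧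
           (x + (PySem.List.pyGetD verts i (0,0,0)).1 + (PySem.List.pyGetD verts j (0,0,0)).1,
            y + (PySem.List.pyGetD verts i (0,0,0)).2.1 + (PySem.List.pyGetD verts j (0,0,0)).2.1,
            z + (PySem.List.pyGetD verts i (0,0,0)).2.2 + (PySem.List.pyGetD verts j (0,0,0)).2.2) ∈ sites
        then acc2 ++ [(i, j)] else acc2) acc) ([] : List (Int × Int)))
    = pvEdges x y z sites verts := by
  have hin : ∀ (i : Int) (acc : List (Int × Int)),
      ((PySem.List.pyRange (i+1) (verts.length : Int) 1).foldl (fun acc2 j =>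
        if (PySem.List.pyGetD verts i (0,0,0)).1 * (PySem.List.pyGetD verts j (0,0,0)).1 +
             (PySem.List.pyGetD verts i (0,0,0)).2.1 * (PySem.List.pyGetD verts j (0,0,0)).2.1 +
             (PySem.List.pyGetD verts i (0,0,0)).2.2 * (PySem.List.pyGetD verts j (0,0,0)).2.2 = 0 ∧
           (x + (PySem.List.pyGetD verts i (0,0,0)).1 + (PySem.List.pyGetD verts j (0,0,0)).1,
            y + (PySem.List.pyGetD verts i (0,0,0)).2.1 + (PySem.List.pyGetD verts j (0,0,0)).2.1,
            z + (PySem.List.pyGetD verts i (0,0,0)).2.2 + (PySem.List.pyGetD verts j (0,0,0)).2.2) ∈ sites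
        then acc2 ++ [(i, j)] else acc2) acc)
      = acc ++ ((PySem.List.pyRange (i+1) (verts.length : Int) 1).filter
          (pvQ x y z sites verts i)).map (fun j => (i, j)) := by
    intro i acc
    rw [PySem.List.foldl_append_ite]
    refine congrArg _ (congrArg _ (List.filter_congr ?_))
    intro j _
    rw [Bool.eq_iff_iff]
    simp [pvQ, pvDotg, pvCorn, pvG]
  refine (PySem.List.foldl_congr_mem _ _ _ _ (fun acc i _ => hin i acc)).trans ?_
  rw [PySem.List.foldl_append_eq_flatMap, List.nil_append]
  rfl

lemma pv_trisA (x y z : Int) (sites verts : List (Int × Int × Int)) :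
    ((PySem.List.enumerate verts).foldl (fun acc p1 =>
      (PySem.List.enumerate verts).foldl (fun acc2 p2 =>
        if p2.1 ≤ p1.1 then acc2
        else (PySem.List.enumerate verts).foldl (fun acc3 p3 =>
          if p3.1 ≤ p2.1 then acc3
          else if p1.2.1 * p2.2.1 + p1.2.2.1 * p2.2.2.1 + p1.2.2.2 * p2.2.2.2 ≠ 0 ∨ p1.2.1 * p3.2.1 + p1.2.2.1 * p3.2.2.1 + p1.2.2.2 * p3.2.2.2 ≠ 0 ∨ p2.2.1 * p3.2.1 + p2.2.2.1 * p3.2.2.1 + p2.2.2.2 * p3.2.2.2 ≠ 0 then acc3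
          else if (([(x + p1.2.1, y + p1.2.2.1, z + p1.2.2.2),
                 (x + p2.2.1, y + p2.2.2.1, z + p2.2.2.2),
                 (x + p3.2.1, y + p3.2.2.1, z + p3.2.2.2),
                 (x + p1.2.1 + p2.2.1, y + p1.2.2.1 + p2.2.2.1, z + p1.2.2.2 + p2.2.2.2),
                 (x + p1.2.1 + p3.2.1, y + p1.2.2.1 + p3.2.2.1, z + p1.2.2.2 + p3.2.2.2),
                 (x + p2.2.1 + p3.2.1, y + p2.2.2.1 + p3.2.2.1, z + p2.2.2.2 + p3.2.2.2),
                 (x + p1.2.1 + p2.2.1 + p3.2.1, y + p1.2.2.1 + p2.2.2.1 + p3.2.2.1, z + p1.2.2.2 + p2.2.2.2 + p3.2.2.2)] : List (Int × Int × Int)).all (fun p => decide (p ∈ sites)))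
            then acc3 ++ [(p1.1, p2.1, p3.1)] else acc3) acc2) acc)
      ([] : List (Int × Int × Int)))
    = pvTfun (verts.length : Int) (pvCA x y z sites verts) := by
  have hk : ∀ (p1 p2 : Int × (Int × Int × Int)) (acc3 : List (Int × Int × Int)),
      ((PySem.List.enumerate verts).foldl (fun acc3 p3 =>
          if p3.1 ≤ p2.1 then acc3
          else if p1.2.1 * p2.2.1 + p1.2.2.1 * p2.2.2.1 + p1.2.2.2 * p2.2.2.2 ≠ 0 ∨ p1.2.1 * p3.2.1 + p1.2.2.1 * p3.2.2.1 + p1.2.2.2 * p3.2.2.2 ≠ 0 ∨ p2.2.1 * p3.2.1 + p2.2.2.1 * p3.2.2.1 + p2.2.2.2 * p3.2.2.2 ≠ 0 then acc3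
          else if (([(x + p1.2.1, y + p1.2.2.1, z + p1.2.2.2),
                 (x + p2.2.1, y + p2.2.2.1, z + p2.2.2.2),
                 (x + p3.2.1, y + p3.2.2.1, z + p3.2.2.2),
                 (x + p1.2.1 + p2.2.1, y + p1.2.2.1 + p2.2.2.1, z + p1.2.2.2 + p2.2.2.2),
                 (x + p1.2.1 + p3.2.1, y + p1.2.2.1 + p3.2.2.1, z + p1.2.2.2 + p3.2.2.2),
                 (x + p2.2.1 + p3.2.1, y + p2.2.2.1 + p3.2.2.1, z + p2.2.2.2 + p3.2.2.2),
                 (x + p1.2.1 + p2.2.1 + p3.2.1, y + p1.2.2.1 + p2.2.2.1 + p3.2.2.1, z + p1.2.2.2 + p2.2.2.2 + p3.2.2.2)] : List (Int × Int × Int)).all (fun p => decide (p ∈ sites)))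
            then acc3 ++ [(p1.1, p2.1, p3.1)] else acc3) acc3)
      = acc3 ++ ((PySem.List.enumerate verts).filter (fun p3 => decide (¬ (p3.1 ≤ p2.1) ∧
            ¬ (p1.2.1 * p2.2.1 + p1.2.2.1 * p2.2.2.1 + p1.2.2.2 * p2.2.2.2 ≠ 0 ∨ p1.2.1 * p3.2.1 + p1.2.2.1 * p3.2.2.1 + p1.2.2.2 * p3.2.2.2 ≠ 0 ∨ p2.2.1 * p3.2.1 + p2.2.2.1 * p3.2.2.1 + p2.2.2.2 * p3.2.2.2 ≠ 0) ∧
            (([(x + p1.2.1, y + p1.2.2.1, z + p1.2.2.2),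
                 (x + p2.2.1, y + p2.2.2.1, z + p2.2.2.2),
                 (x + p3.2.1, y + p3.2.2.1, z + p3.2.2.2),
                 (x + p1.2.1 + p2.2.1, y + p1.2.2.1 + p2.2.2.1, z + p1.2.2.2 + p2.2.2.2),
                 (x + p1.2.1 + p3.2.1, y + p1.2.2.1 + p3.2.2.1, z + p1.2.2.2 + p3.2.2.2),
                 (x + p2.2.1 + p3.2.1, y + p2.2.2.1 + p3.2.2.1, z + p2.2.2.2 + p3.2.2.2),
                 (x + p1.2.1 + p2.2.1 + p3.2.1, y + p1.2.2.1 + p2.2.2.1 + p3.2.2.1, z + p1.2.2.2 + p2.2.2.2 + p3.2.2.2)] : List (Int × Int × Int)).all (fun p => decide (p ∈ sites))) = true))).map (fun p3 => (p1.1, p2.1, p3.1)) := by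
    intro p1 p2 acc3
    refine (PySem.List.foldl_congr_mem _ _ _ _ (fun acc3' p3 _ => ?_)).trans
      (PySem.List.foldl_append_ite _ _ _ _)
    split_ifs <;> tauto
  have hj : ∀ (p1 : Int × (Int × Int × Int)) (acc : List (Int × Int × Int)),
      ((PySem.List.enumerate verts).foldl (fun acc2 p2 =>
        if p2.1 ≤ p1.1 then acc2
        else (PySem.List.enumerate verts).foldl (fun acc3 p3 =>
          if p3.1 ≤ p2.1 then acc3
          else if p1.2.1 * p2.2.1 + p1.2.2.1 * p2.2.2.1 + p1.2.2.2 * p2.2.2.2 ≠ 0 ∨ p1.2.1 * p3.2.1 + p1.2.2.1 * p3.2.2.1 + p1.2.2.2 * p3.2.2.2 ≠ 0 ∨ p2.2.1 * p3.2.1 + p2.2.2.1 * p3.2.2.1 + p2.2.2.2 * p3.2.2.2 ≠ 0 then acc3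
          else if (([(x + p1.2.1, y + p1.2.2.1, z + p1.2.2.2),
                 (x + p2.2.1, y + p2.2.2.1, z + p2.2.2.2),
                 (x + p3.2.1, y + p3.2.2.1, z + p3.2.2.2),
                 (x + p1.2.1 + p2.2.1, y + p1.2.2.1 + p2.2.2.1, z + p1.2.2.2 + p2.2.2.2),
                 (x + p1.2.1 + p3.2.1, y + p1.2.2.1 + p3.2.2.1, z + p1.2.2.2 + p3.2.2.2),
                 (x + p2.2.1 + p3.2.1, y + p2.2.2.1 + p3.2.2.1, z + p2.2.2.2 + p3.2.2.2),
                 (x + p1.2.1 + p2.2.1 + p3.2.1, y + p1.2.2.1 + p2.2.2.1 + p3.2.2.1, z + p1.2.2.2 + p2.2.2.2 + p3.2.2.2)] : List (Int × Int × Int)).all (fun p => decide (p ∈ sites)))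
            then acc3 ++ [(p1.1, p2.1, p3.1)] else acc3) acc2) acc)
      = acc ++ (PySem.List.enumerate verts).flatMap (fun p2 =>
          ((PySem.List.enumerate verts).filter (fun p3 => decide (¬ (p2.1 ≤ p1.1) ∧ ¬ (p3.1 ≤ p2.1) ∧
            ¬ (p1.2.1 * p2.2.1 + p1.2.2.1 * p2.2.2.1 + p1.2.2.2 * p2.2.2.2 ≠ 0 ∨ p1.2.1 * p3.2.1 + p1.2.2.1 * p3.2.2.1 + p1.2.2.2 * p3.2.2.2 ≠ 0 ∨ p2.2.1 * p3.2.1 + p2.2.2.1 * p3.2.2.1 + p2.2.2.2 * p3.2.2.2 ≠ 0) ∧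
            (([(x + p1.2.1, y + p1.2.2.1, z + p1.2.2.2),
                 (x + p2.2.1, y + p2.2.2.1, z + p2.2.2.2),
                 (x + p3.2.1, y + p3.2.2.1, z + p3.2.2.2),
                 (x + p1.2.1 + p2.2.1, y + p1.2.2.1 + p2.2.2.1, z + p1.2.2.2 + p2.2.2.2),
                 (x + p1.2.1 + p3.2.1, y + p1.2.2.1 + p3.2.2.1, z + p1.2.2.2 + p3.2.2.2),
                 (x + p2.2.1 + p3.2.1, y + p2.2.2.1 + p3.2.2.1, z + p2.2.2.2 + p3.2.2.2),
                 (x + p1.2.1 + p2.2.1 + p3.2.1, y + p1.2.2.1 + p2.2.2.1 + p3.2.2.1, z + p1.2.2.2 + p2.2.2.2 + p3.2.2.2)] : List (Int × Int × Int)).all (fun p => decide (p ∈ sites))) = true))).map (fun p3 => (p1.1, p2.1, p3.1))) := by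
    intro p1 acc
    refine (PySem.List.foldl_congr_mem _ _ _ _ (fun acc2 p2 _ => ?_)).trans
      (PySem.List.foldl_append_eq_flatMap _ _ _)
    by_cases hc : p2.1 ≤ p1.1
    · rw [if_pos hc]
      have : (PySem.List.enumerate verts).filter (fun p3 => decide (¬ (p2.1 ≤ p1.1) ∧ ¬ (p3.1 ≤ p2.1) ∧
            ¬ (p1.2.1 * p2.2.1 + p1.2.2.1 * p2.2.2.1 + p1.2.2.2 * p2.2.2.2 ≠ 0 ∨ p1.2.1 * p3.2.1 + p1.2.2.1 * p3.2.2.1 + p1.2.2.2 * p3.2.2.2 ≠ 0 ∨ p2.2.1 * p3.2.1 + p2.2.2.1 * p3.2.2.1 + p2.2.2.2 * p3.2.2.2 ≠ 0) ∧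
            (([(x + p1.2.1, y + p1.2.2.1, z + p1.2.2.2),
                 (x + p2.2.1, y + p2.2.2.1, z + p2.2.2.2),
                 (x + p3.2.1, y + p3.2.2.1, z + p3.2.2.2),
                 (x + p1.2.1 + p2.2.1, y + p1.2.2.1 + p2.2.2.1, z + p1.2.2.2 + p2.2.2.2),
                 (x + p1.2.1 + p3.2.1, y + p1.2.2.1 + p3.2.2.1, z + p1.2.2.2 + p3.2.2.2),
                 (x + p2.2.1 + p3.2.1, y + p2.2.2.1 + p3.2.2.1, z + p2.2.2.2 + p3.2.2.2),
                 (x + p1.2.1 + p2.2.1 + p3.2.1, y + p1.2.2.1 + p2.2.2.1 + p3.2.2.1, z + p1.2.2.2 + p2.2.2.2 + p3.2.2.2)] : List (Int × Int × Int)).all (fun p => decide (p ∈ sites))) = true)) = [] := by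
        apply List.filter_eq_nil_iff.mpr
        intro p3 _
        simp only [decide_eq_true_eq, not_and]
        intro h; exact absurd hc h
      rw [this]
      simp
    · rw [if_neg hc, hk p1 p2 acc2]
      refine congrArg _ (congrArg _ (List.filter_congr (fun p3 _ => ?_)))
      rw [Bool.eq_iff_iff]
      simp only [decide_eq_true_eq]
      tauto
  refine (PySem.List.foldl_congr_mem _ _ _ _ (fun acc p1 _ => hj p1 acc)).trans ?_
  rw [PySem.List.foldl_append_eq_flatMap, List.nil_append,
    PySem.List.enumerate_eq_map_pyRange verts (0,0,0)]
  simp only [List.flatMap_map, List.filter_map, List.map_map, PySem.List.len_eq,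
    Function.comp_def]
  apply pv_flatMap_congr
  intro i hi
  rw [PySem.List.mem_pyRange_one] at hi
  refine Eq.trans (pv_flatMap_range_lt (verts.length : Int) i _ hi.1 (fun j hj' => ?_)) ?_
  · rw [List.map_eq_nil_iff]
    apply List.filter_eq_nil_iff.mpr
    intro k _
    simp only [decide_eq_true_eq, not_and]
    intro hA
    exact absurd (show j ≤ i by omega) hA
  apply pv_flatMap_congr
  intro j hj'
  rw [PySem.List.mem_pyRange_one] at hj'
  rw [List.filter_congr (q := fun k => decide (j < k) && pvCA x y z sites verts i j k)
    (fun k _ => by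
      rw [Bool.eq_iff_iff]
      have hij : i < j := by omega
      simp only [pvCA, pvG, pvDotg, pvCorn, pvBody, Bool.and_eq_true, decide_eq_true_eq,
        beq_iff_eq, List.all_cons, List.all_nil, Bool.and_true, not_or, not_not, not_le]
      tauto)]
  rw [pv_filter_range_lt _ _ _ (by omega : (0:Int) ≤ j)]

lemma pv_trisB (x y z : Int) (sites verts : List (Int × Int × Int)) :
    ((PySem.List.pyRange 0 (verts.length : Int) 1).foldl (fun acc i =>
      (PySem.List.pyRange (i+1) (verts.length : Int) 1).foldl (fun acc2 j =>
        if (i, j) ∉ pvEdges x y z sites verts then acc2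
        else (PySem.List.pyRange (j+1) (verts.length : Int) 1).foldl (fun acc3 k =>
          if (i, k) ∈ pvEdges x y z sites verts ∧ (j, k) ∈ pvEdges x y z sites verts then
            if (x + (PySem.List.pyGetD verts i (0,0,0)).1 + (PySem.List.pyGetD verts j (0,0,0)).1 + (PySem.List.pyGetD verts k (0,0,0)).1,
                y + (PySem.List.pyGetD verts i (0,0,0)).2.1 + (PySem.List.pyGetD verts j (0,0,0)).2.1 + (PySem.List.pyGetD verts k (0,0,0)).2.1,
                z + (PySem.List.pyGetD verts i (0,0,0)).2.2 + (PySem.List.pyGetD verts j (0,0,0)).2.2 + (PySem.List.pyGetD verts k (0,0,0)).2.2) ∈ sites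
            then acc3 ++ [(i, j, k)] else acc3
          else acc3) acc2) acc) ([] : List (Int × Int × Int)))
    = pvTfun (verts.length : Int) (pvCB x y z sites verts) := by
  have hk : ∀ (i j : Int) (acc3 : List (Int × Int × Int)),
      ((PySem.List.pyRange (j+1) (verts.length : Int) 1).foldl (fun acc3 k =>
        if (i, k) ∈ pvEdges x y z sites verts ∧ (j, k) ∈ pvEdges x y z sites verts then
          if (x + (PySem.List.pyGetD verts i (0,0,0)).1 + (PySem.List.pyGetD verts j (0,0,0)).1 + (PySem.List.pyGetD verts k (0,0,0)).1,
              y + (PySem.List.pyGetD verts i (0,0,0)).2.1 + (PySem.List.pyGetD verts j (0,0,0)).2.1 + (PySem.List.pyGetD verts k (0,0,0)).2.1,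
              z + (PySem.List.pyGetD verts i (0,0,0)).2.2 + (PySem.List.pyGetD verts j (0,0,0)).2.2 + (PySem.List.pyGetD verts k (0,0,0)).2.2) ∈ sites
          then acc3 ++ [(i, j, k)] else acc3
        else acc3) acc3)
      = acc3 ++ ((PySem.List.pyRange (j+1) (verts.length : Int) 1).filter (fun k =>
          decide (((i, k) ∈ pvEdges x y z sites verts ∧ (j, k) ∈ pvEdges x y z sites verts) ∧
            pvBody x y z verts i j k ∈ sites))).map (fun k => (i, j, k)) := by
    intro i j acc3
    refine (PySem.List.foldl_congr_mem _ _ _ _ (fun acc3' k _ => ?_)).trans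
      (PySem.List.foldl_append_ite _ _ _ _)
    simp only [pvBody, pvG]
    split_ifs <;> tauto
  have hj : ∀ (i : Int) (acc : List (Int × Int × Int)),
      ((PySem.List.pyRange (i+1) (verts.length : Int) 1).foldl (fun acc2 j =>
        if (i, j) ∉ pvEdges x y z sites verts then acc2
        else (PySem.List.pyRange (j+1) (verts.length : Int) 1).foldl (fun acc3 k =>
          if (i, k) ∈ pvEdges x y z sites verts ∧ (j, k) ∈ pvEdges x y z sites verts then
            if (x + (PySem.List.pyGetD verts i (0,0,0)).1 + (PySem.List.pyGetD verts j (0,0,0)).1 + (PySem.List.pyGetD verts k (0,0,0)).1,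
                y + (PySem.List.pyGetD verts i (0,0,0)).2.1 + (PySem.List.pyGetD verts j (0,0,0)).2.1 + (PySem.List.pyGetD verts k (0,0,0)).2.1,
                z + (PySem.List.pyGetD verts i (0,0,0)).2.2 + (PySem.List.pyGetD verts j (0,0,0)).2.2 + (PySem.List.pyGetD verts k (0,0,0)).2.2) ∈ sites
            then acc3 ++ [(i, j, k)] else acc3
          else acc3) acc2) acc)
      = acc ++ (PySem.List.pyRange (i+1) (verts.length : Int) 1).flatMap (fun j =>
          ((PySem.List.pyRange (j+1) (verts.length : Int) 1).filter (fun k =>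
            pvCB x y z sites verts i j k)).map (fun k => (i, j, k))) := by
    intro i acc
    refine (PySem.List.foldl_congr_mem _ _ _ _ (fun acc2 j _ => ?_)).trans
      (PySem.List.foldl_append_eq_flatMap _ _ _)
    by_cases hc : (i, j) ∈ pvEdges x y z sites verts
    · rw [if_neg (by simpa using hc), hk i j acc2]
      refine congrArg _ (congrArg _ (List.filter_congr (fun k _ => ?_)))
      rw [Bool.eq_iff_iff]
      simp [pvCB, hc]
    · rw [if_pos (by simpa using hc)]
      have : (PySem.List.pyRange (j+1) (verts.length : Int) 1).filter
          (fun k => pvCB x y z sites verts i j k) = [] := by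
        apply List.filter_eq_nil_iff.mpr
        intro k _
        simp [pvCB, hc]
      rw [this]
      simp
  refine (PySem.List.foldl_congr_mem _ _ _ _ (fun acc i _ => hj i acc)).trans ?_
  rw [PySem.List.foldl_append_eq_flatMap, List.nil_append]
  rfl

lemma pv_Tfun_congr (n : Int) (C₁ C₂ : Int → Int → Int → Bool)
    (h : ∀ i j k, 0 ≤ i → i < j → j < k → k < n → C₁ i j k = C₂ i j k) :
    pvTfun n C₁ = pvTfun n C₂ := by
  unfold pvTfun
  apply pv_flatMap_congr
  intro i hi
  rw [PySem.List.mem_pyRange_one] at hi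
  apply pv_flatMap_congr
  intro j hj
  rw [PySem.List.mem_pyRange_one] at hj
  refine congrArg _ (List.filter_congr ?_)
  intro k hk
  rw [PySem.List.mem_pyRange_one] at hk
  exact h i j k (by omega) (by omega) (by omega) (by omega)

lemma pv_CA_eq_CB (x y z : Int) (sites verts : List (Int × Int × Int))
    (hbase : ∀ i : Int, 0 ≤ i → i < (verts.length : Int) →
      (x + (pvG verts i).1, y + (pvG verts i).2.1, z + (pvG verts i).2.2) ∈ sites)
    (i j k : Int) (hi : 0 ≤ i) (hij : i < j) (hjk : j < k) (hk : k < (verts.length : Int)) :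
    pvCA x y z sites verts i j k = pvCB x y z sites verts i j k := by
  have hb1 := hbase i hi (by omega)
  have hb2 := hbase j (by omega) (by omega)
  have hb3 := hbase k (by omega) (by omega)
  rw [Bool.eq_iff_iff]
  unfold pvCA pvCB
  simp only [mem_pvEdges, pvQ, Bool.and_eq_true, decide_eq_true_eq, beq_iff_eq]
  have h1 : i < k := by omega
  have h2 : j < (verts.length : Int) := by omega
  have h3 : i < (verts.length : Int) := by omega
  have h4 : (0:Int) ≤ j := by omega
  tauto

-- ===== VERDICT (by name: the statement is the Claim_ definition above) =====
lemma pv_base (x y z : Int) (sites verts : List (Int × Int × Int))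
    (hv : ∀ d ∈ verts, (x + d.1, y + d.2.1, z + d.2.2) ∈ sites) :
    ∀ i : Int, 0 ≤ i → i < (verts.length : Int) →
      (x + (pvG verts i).1, y + (pvG verts i).2.1, z + (pvG verts i).2.2) ∈ sites := by
  intro i h0 hn
  have hm : pvG verts i ∈ verts := by
    rw [pvG, PySem.List.pyGetD_eq_getElem _ _ h0 hn]
    exact List.getElem_mem _
  exact hv _ hm

theorem vertex_link_BR_spec : Claim_equal_vertex_link_BR := by
  intro v sites _
  unfold Spec_vertex_link_BR vertex_link_BR vertex_link_BR_alt
  simp only [pv_edgesA, pv_edgesB, pv_trisA, pv_trisB, Prod.mk.injEq]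
  refine ⟨trivial, trivial, ?_⟩
  apply pv_Tfun_congr
  intro i j k hi hij hjk hk
  refine pv_CA_eq_CB _ _ _ _ _ ?_ i j k hi hij hjk hk
  apply pv_base
  intro d hd
  rw [List.mem_filter] at hd
  simpa using hd.2
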